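-- pv_equiv track=rewrite | github.com/mic569/Birthday_Probability | project_3.py | check_district_birthdays
-- ===== SOURCE A (Python) =====
-- def check_class_bdays(bday_list, num_st_matches):
--     act_match = max([bday_list.count(entry) for entry in bday_list])
--     if act_match >= num_st_matches:
--            return (True)
--     else:
--            return (False)
--
-- def check_school_birthdays(shclass, clmatch, stmatch):
--     stud_matcher = 0
--     return([check_class_bdays(shclass, stmatch) for j in shclass].count(True) >= clmatch)
--
-- def check_district_birthdays(dslist, nshmatch, nclmatches, nstmatch):
--     st_matcher = 0
--     for g in range(len(dslist)):
--         ch = check_school_birthdays(dslist[g], nclmatches, nstmatch)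
--         if ch == True:
--             st_matcher = st_matcher + 1
--     if st_matcher >= nshmatch:
--         return True
--     else:
--         return False
-- ===== SOURCE B (Python) =====
-- def check_district_birthdays(dslist, nshmatch, nclmatches, nstmatch):
--     matched = 0
--     for school in dslist:
--         counts = {}
--         for b in school:
--             counts[b] = counts.get(b, 0) + 1
--         best = 0
--         for c in counts.values():
--             if c > best:
--                 best = c
--         size = len(school) if best >= nstmatch else 0
--         if size >= nclmatches:
--             matched += 1
--     return matched >= nshmatch
-- ===== Notes on version B (the rewrite author's own statement) =====
-- stated objective: faster
-- what changed: Inlined the three helpers into a single loop that builds a dict of birthday counts once per school and takes the max of its values, instead of A's per-student list.count scans and n-fold recomputation of the same class check.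
import Mathlib
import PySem

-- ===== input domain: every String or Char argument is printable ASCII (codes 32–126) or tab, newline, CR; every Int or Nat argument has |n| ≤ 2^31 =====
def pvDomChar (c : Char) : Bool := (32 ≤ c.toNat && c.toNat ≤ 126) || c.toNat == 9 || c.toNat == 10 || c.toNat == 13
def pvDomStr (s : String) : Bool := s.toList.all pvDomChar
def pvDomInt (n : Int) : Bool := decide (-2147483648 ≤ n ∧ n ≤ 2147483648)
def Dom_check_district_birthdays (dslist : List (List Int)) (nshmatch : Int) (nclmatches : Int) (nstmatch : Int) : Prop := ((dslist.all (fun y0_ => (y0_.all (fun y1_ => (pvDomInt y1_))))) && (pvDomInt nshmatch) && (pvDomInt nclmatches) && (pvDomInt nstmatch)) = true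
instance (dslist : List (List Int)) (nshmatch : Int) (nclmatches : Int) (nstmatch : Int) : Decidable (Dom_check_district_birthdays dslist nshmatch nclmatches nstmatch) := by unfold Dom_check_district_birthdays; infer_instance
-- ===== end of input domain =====

-- B inlines the three helpers into one pass per school, replacing A's repeated list.count scans
-- (and A's per-student recomputation of the same class check) with a dict of counts built once; objective: faster.

-- ===== PORT A =====
-- A's check_class_bdays: max([]) would raise ValueError; the 'none' branch is unreachable in A
-- (check_class_bdays is only invoked from a comprehension over a nonempty list), ported as 'false'.
def check_class_bdays (bday_list : List Int) (num_st_matches : Int) : Bool :=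
  match PySem.List.max? (bday_list.map (fun entry => (PySem.List.count bday_list entry : Int))) (fun x => x) with
  | none => false
  | some act_match => if act_match ≥ num_st_matches then true else false

def check_school_birthdays (shclass : List Int) (clmatch : Int) (stmatch : Int) : Bool :=
  let _stud_matcher : Int := 0
  decide (((PySem.List.count (shclass.map (fun _j => check_class_bdays shclass stmatch)) true : Int)) ≥ clmatch)

def check_district_birthdays (dslist : List (List Int)) (nshmatch : Int) (nclmatches : Int) (nstmatch : Int) : Bool :=
  let st_matcher : Int :=
    (PySem.List.pyRange 0 (PySem.List.len dslist) 1).foldl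
      (fun st_matcher g =>
        let ch := check_school_birthdays (PySem.List.pyGetD dslist g []) nclmatches nstmatch
        if ch == true then st_matcher + 1 else st_matcher) 0
  if st_matcher ≥ nshmatch then true else false

-- ===== PORT B =====
def check_district_birthdays_alt (dslist : List (List Int)) (nshmatch : Int) (nclmatches : Int) (nstmatch : Int) : Bool :=
  let matched : Int := dslist.foldl
    (fun matched school =>
      let counts : PySem.Dict Int Int :=
        school.foldl (fun d b => d.insert b (d.getD b 0 + 1)) PySem.Dict.empty
      let best : Int := counts.values.foldl (fun best c => if c > best then c else best) 0
      let size : Int := if best ≥ nstmatch then (school.length : Int) else 0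
      if size ≥ nclmatches then matched + 1 else matched) 0
  decide (matched ≥ nshmatch)

-- ===== PRECONDITION & SPEC =====
def Spec_check_district_birthdays (dslist : List (List Int)) (nshmatch : Int) (nclmatches : Int) (nstmatch : Int) (out : Bool) : Prop := out = check_district_birthdays_alt dslist nshmatch nclmatches nstmatch
instance (dslist : List (List Int)) (nshmatch : Int) (nclmatches : Int) (nstmatch : Int) (out : Bool) : Decidable (Spec_check_district_birthdays dslist nshmatch nclmatches nstmatch out) := by unfold Spec_check_district_birthdays; infer_instance

-- ===== CLAIM (what is proved, stated in full; the proofs are below) =====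
def Claim_equal_check_district_birthdays : Prop := ∀ (dslist : List (List Int)) (nshmatch : Int) (nclmatches : Int) (nstmatch : Int), Dom_check_district_birthdays dslist nshmatch nclmatches nstmatch → Spec_check_district_birthdays dslist nshmatch nclmatches nstmatch (check_district_birthdays dslist nshmatch nclmatches nstmatch)

-- ===== LEMMAS AND PROOFS =====
lemma ite_gt_eq_max (b c : Int) : (if c > b then c else b) = max b c := by
  rw [max_def]; split_ifs <;> omega

lemma values_counter_eq (school : List Int) :
    (PySem.Dict.counter school).values
      = (PySem.Set.ofList school).map (fun k => ((List.count k school : Int))) := by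
  show ((PySem.Dict.counter school).items).map (·.2) = _
  rw [PySem.Dict.items_counter]
  simp [List.map_map, Function.comp]

lemma school_eq (school : List Int) (ncl nst : Int) :
    check_school_birthdays school ncl nst =
      decide ((if (school.foldl (fun d b => d.insert b (d.getD b 0 + 1)) PySem.Dict.empty).values.foldl
                    (fun best c => if c > best then c else best) (0:Int) ≥ nst
               then (school.length : Int) else 0) ≥ ncl) := by
  rw [PySem.Dict.foldl_insert_getD_add_one_eq_counter, values_counter_eq]
  have hmax : (fun (best c : Int) => if c > best then c else best) = max :=
    funext fun b => funext fun c => ite_gt_eq_max b c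
  rw [hmax]
  rcases school with _ | ⟨x, rest⟩
  · simp [check_school_birthdays, PySem.List.count]
  · set school := x :: rest with hs
    have hne : school ≠ [] := by simp [hs]
    -- A's inner maximum
    rcases hm : PySem.List.max? (school.map (fun entry => (PySem.List.count school entry : Int))) (fun x => x) with _ | m
    · exfalso
      rw [PySem.List.max?_eq_none_iff] at hm
      simp [hs] at hm
    · -- B's best equals m
      set V := (PySem.Set.ofList school).map (fun k => ((List.count k school : Int))) with hV
      set best := V.foldl max (0:Int) with hb
      have hbest : best = m := by
        have h1 : m ≤ best := by
          have hmem := PySem.List.max?_mem hm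
          rcases List.mem_map.mp hmem with ⟨e, he, hme⟩
          have : (PySem.List.count school e : Int) ∈ V := by
            apply List.mem_map.mpr
            exact ⟨e, (PySem.Set.mem_ofList school e).mpr he, by simp [PySem.List.count_eq]⟩
          have := (PySem.List.le_foldl_max V (0:Int)).2 _ this
          omega
        have h2 : best ≤ m := by
          rcases PySem.List.foldl_max_mem V (0:Int) with h0 | hmem
          · -- best = 0, but m = count of an element ≥ 1 : contradiction with h1? no: best ≤ m needed
            have hmm := PySem.List.max?_mem hm
            rcases List.mem_map.mp hmm with ⟨e, he, hme⟩
            have : 0 < PySem.List.count school e := by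
              simp [PySem.List.count_eq]
              exact he
            omega
          · rcases List.mem_map.mp hmem with ⟨k, hk, hkb⟩
            have hks : k ∈ school := (PySem.Set.mem_ofList school k).mp hk
            have : best ∈ (school.map (fun entry => (PySem.List.count school entry : Int))) := by
              apply List.mem_map.mpr
              exact ⟨k, hks, by rw [hb, ← hkb]; simp [PySem.List.count_eq]⟩
            exact PySem.List.max?_isMax hm _ this
        omega
      -- A's count of the constant boolean list
      have hconst : school.map (fun _j => check_class_bdays school nst)
          = List.replicate school.length (check_class_bdays school nst) := by
        simp [List.map_const']
      rw [check_school_birthdays]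
      simp only [hconst]
      rw [check_class_bdays, hm]
      rw [hbest]
      by_cases hcond : m ≥ nst
      · simp [hcond, PySem.List.count_eq]
      · simp [hcond, PySem.List.count_eq, List.count_replicate]

-- ===== VERDICT (by name: the statement is the Claim_ definition above) =====
theorem check_district_birthdays_spec : Claim_equal_check_district_birthdays := by
  unfold Claim_equal_check_district_birthdays Spec_check_district_birthdays
  intro dslist nshmatch nclmatches nstmatch _
  rw [check_district_birthdays, check_district_birthdays_alt]
  rw [PySem.List.foldl_pyRange_zero_pyGetD dslist []
      (fun st school => if check_school_birthdays school nclmatches nstmatch == true then st + 1 else st) 0]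
  have : (fun (st : Int) (school : List Int) =>
      if check_school_birthdays school nclmatches nstmatch == true then st + 1 else st)
    = (fun (matched : Int) (school : List Int) =>
      if (if (school.foldl (fun d b => d.insert b (d.getD b 0 + 1)) PySem.Dict.empty).values.foldl
              (fun best c => if c > best then c else best) (0:Int) ≥ nstmatch
            then (school.length : Int) else 0) ≥ nclmatches then matched + 1 else matched) := by
    funext st school
    rw [school_eq school nclmatches nstmatch]
    by_cases h : ((if (school.foldl (fun d b => d.insert b (d.getD b 0 + 1)) PySem.Dict.empty).values.foldl
              (fun best c => if c > best then c else best) (0:Int) ≥ nstmatch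
            then (school.length : Int) else 0) ≥ nclmatches) <;> simp [h]
  rw [this]
  simp [ge_iff_le]
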